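-- pv_equiv track=rewrite | github.com/MankiniChykan/chihiros-led-control | custom_components/chihiros/chihiros_doser_control/protocol.py | _weekday_str
-- ===== SOURCE A (Python) =====
-- from typing import List, Dict, Any, Tuple, Optional, Iterable, Union, Callable
--
-- WEEKDAY_BITS = {
--     64: "monday",
--     32: "tuesday",
--     16: "wednesday",
--     8:  "thursday",
--     4:  "friday",
--     2:  "saturday",
--     1:  "sunday",
-- }
--
-- def decode_weekdays(mask: int) -> List[str]:
--     if mask == 127:
--         return ["everyday"]
--     return [name for bit, name in WEEKDAY_BITS.items() if mask & bit]
--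
-- def _weekday_str(mask: Optional[int]) -> str:
--     if mask is None:
--         return "unknown"
--     names = decode_weekdays(int(mask))
--     if names == ["everyday"]:
--         return "Every day"
--     order = ["monday","tuesday","wednesday","thursday","friday","saturday","sunday"]
--     names_sorted = [n for n in order if n in names]
--     short = {"monday":"Mon","tuesday":"Tue","wednesday":"Wed","thursday":"Thu",
--              "friday":"Fri","saturday":"Sat","sunday":"Sun"}
--     return ",".join(short[n] for n in names_sorted) if names_sorted else "None"
-- ===== SOURCE B (Python) =====
-- def _build_table():
--     # all 128 bit-combinations by doubling, low bit (Sunday) first;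
--     # prepending keeps more-significant days (Monday) at the front
--     combos = [[]]
--     for short in ("Sun", "Sat", "Fri", "Thu", "Wed", "Tue", "Mon"):
--         combos = combos + [[short] + c for c in combos]
--     return [",".join(c) if c else "None" for c in combos]
--
-- _TABLE = _build_table()
--
-- def _weekday_str(mask):
--     if mask is None:
--         return "unknown"
--     m = int(mask)
--     return "Every day" if m == 127 else _TABLE[m & 127]
-- ===== Notes on version B (the rewrite author's own statement) =====
-- stated objective: alternative
-- what changed: B precomputes one 128-entry string table of every weekday combination by repeated doubling (prepending each day to all previously built combinations) and answers a query with a single indexed lookup at mask & 127, instead of A's per-call decode/reorder/remap pipeline over the bitmask.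
import Mathlib
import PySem

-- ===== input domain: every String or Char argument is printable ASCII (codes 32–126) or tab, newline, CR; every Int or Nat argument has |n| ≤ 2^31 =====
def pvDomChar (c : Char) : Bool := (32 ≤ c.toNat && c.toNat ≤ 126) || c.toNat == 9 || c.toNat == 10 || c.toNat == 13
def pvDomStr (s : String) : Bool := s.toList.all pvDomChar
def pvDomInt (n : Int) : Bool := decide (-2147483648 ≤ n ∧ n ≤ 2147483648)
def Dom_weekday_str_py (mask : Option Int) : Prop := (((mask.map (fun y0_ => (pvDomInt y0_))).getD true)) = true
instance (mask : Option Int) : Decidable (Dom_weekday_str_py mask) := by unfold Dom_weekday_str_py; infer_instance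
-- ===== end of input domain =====

-- B precomputes a 128-entry table of every weekday-combination string by doubling and answers
-- each call with one lookup at mask & 127, replacing A's decode/reorder/remap pipeline.

-- ===== PORT A =====
-- WEEKDAY_BITS dict literal (insertion order)
def weekdayBitsA : PySem.Dict Int String :=
  PySem.Dict.ofList [(64, "monday"), (32, "tuesday"), (16, "wednesday"), (8, "thursday"),
                     (4, "friday"), (2, "saturday"), (1, "sunday")]

def decode_weekdays_py (mask : Int) : List String :=
  if mask == 127 then ["everyday"]
  else (weekdayBitsA.items.filter (fun p => PySem.Int.band mask p.1 != 0)).map (·.2)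

def shortA : PySem.Dict String String :=
  PySem.Dict.ofList [("monday", "Mon"), ("tuesday", "Tue"), ("wednesday", "Wed"),
                     ("thursday", "Thu"), ("friday", "Fri"), ("saturday", "Sat"), ("sunday", "Sun")]

def orderA : List String :=
  ["monday", "tuesday", "wednesday", "thursday", "friday", "saturday", "sunday"]

def weekday_str_py (mask : Option Int) : String :=
  match mask with
  | none => "unknown"
  | some m =>
    let names := decode_weekdays_py m
    if names == ["everyday"] then "Every day"
    else
      let namesSorted := orderA.filter (fun n => names.contains n)
      -- short[n] always succeeds: every element of namesSorted is a key of shortA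
      if namesSorted.isEmpty then "None"
      else PySem.Str.join "," (namesSorted.map (fun n => shortA.getD n ""))

-- ===== PORT B =====
-- _build_table: all 128 combinations by doubling (Sunday = low bit first, newer day prepended)
def buildTableB : List String :=
  (["Sun", "Sat", "Fri", "Thu", "Wed", "Tue", "Mon"].foldl
      (fun cs short => cs ++ cs.map (fun c => short :: c)) [([] : List String)]).map
    (fun c => if c.isEmpty then "None" else PySem.Str.join "," c)

def weekday_str_py_alt (mask : Option Int) : String :=
  match mask with
  | none => "unknown"
  | some m =>
    -- index m & 127 is always within the 128-entry table
    if m == 127 then "Every day" else PySem.List.pyGetD buildTableB (PySem.Int.band m 127) ""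

-- ===== PRECONDITION & SPEC =====
def Spec_weekday_str_py (mask : Option Int) (out : String) : Prop := out = weekday_str_py_alt mask
instance (mask : Option Int) (out : String) : Decidable (Spec_weekday_str_py mask out) := by unfold Spec_weekday_str_py; infer_instance

-- ===== CLAIM (what is proved, stated in full; the proofs are below) =====
def Claim_equal_weekday_str_py : Prop := ∀ (mask : Option Int), Dom_weekday_str_py mask → Spec_weekday_str_py mask (weekday_str_py mask)

-- ===== LEMMAS AND PROOFS =====

-- A's else-branch as a function of the (already masked) bit pattern
def coreA (r : Int) : String :=
  let names := (weekdayBitsA.items.filter (fun p => PySem.Int.band r p.1 != 0)).map (·.2)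
  if names == ["everyday"] then "Every day"
  else
    let namesSorted := orderA.filter (fun n => names.contains n)
    if namesSorted.isEmpty then "None"
    else PySem.Str.join "," (namesSorted.map (fun n => shortA.getD n ""))

theorem band127_bounds (m : Int) : 0 ≤ PySem.Int.band m 127 ∧ PySem.Int.band m 127 ≤ 127 := by
  unfold PySem.Int.band
  split_ifs with h1 h2 h2 <;> simp_all
  exact Nat.and_le_right

-- masking with 127 first does not change an AND against a sub-mask b of 127
theorem band_via_127 (b : Nat) (hb : 127 &&& b = b)
    (h2 : ∀ y : Nat, y < 128 → (127 - (127 &&& y)) &&& b = b - (b &&& y)) (m : Int) :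
    PySem.Int.band (PySem.Int.band m 127) (b : Int) = PySem.Int.band m (b : Int) := by
  have hx : ∀ x : Nat, (127 - (127 &&& x)) &&& b = b - (b &&& x) := by
    intro x
    have e1 : 127 &&& x = 127 &&& (x &&& 127) := by
      rw [Nat.and_comm x 127, ← Nat.and_assoc, Nat.and_self]
    have e2 : b &&& x = b &&& (x &&& 127) := by
      rw [Nat.and_comm x 127, ← Nat.and_assoc, Nat.and_comm b 127, hb]
    rw [e1, e2]
    exact h2 _ (Nat.lt_of_le_of_lt Nat.and_le_right (by norm_num))
  unfold PySem.Int.band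
  by_cases hm : 0 ≤ m
  · simp only [hm, if_pos]
    have : (0:Int) ≤ 127 := by norm_num
    simp only [this, if_pos, Int.natCast_nonneg]
    simp [Int.toNat_natCast, Nat.and_assoc, hb]
  · simp only [hm]
    have h127 : (0:Int) ≤ 127 := by norm_num
    have hbn : (0:Int) ≤ (b : Int) := Int.natCast_nonneg b
    simp only [h127, if_pos]
    simp [hx]

theorem band64 (m : Int) : PySem.Int.band (PySem.Int.band m 127) 64 = PySem.Int.band m 64 :=
  band_via_127 64 (by decide) (by decide) m
theorem band32 (m : Int) : PySem.Int.band (PySem.Int.band m 127) 32 = PySem.Int.band m 32 :=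
  band_via_127 32 (by decide) (by decide) m
theorem band16 (m : Int) : PySem.Int.band (PySem.Int.band m 127) 16 = PySem.Int.band m 16 :=
  band_via_127 16 (by decide) (by decide) m
theorem band8 (m : Int) : PySem.Int.band (PySem.Int.band m 127) 8 = PySem.Int.band m 8 :=
  band_via_127 8 (by decide) (by decide) m
theorem band4 (m : Int) : PySem.Int.band (PySem.Int.band m 127) 4 = PySem.Int.band m 4 :=
  band_via_127 4 (by decide) (by decide) m
theorem band2 (m : Int) : PySem.Int.band (PySem.Int.band m 127) 2 = PySem.Int.band m 2 :=
  band_via_127 2 (by decide) (by decide) m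
theorem band1 (m : Int) : PySem.Int.band (PySem.Int.band m 127) 1 = PySem.Int.band m 1 :=
  band_via_127 1 (by decide) (by decide) m

theorem itemsA : weekdayBitsA.items =
    [(64, "monday"), (32, "tuesday"), (16, "wednesday"), (8, "thursday"),
     (4, "friday"), (2, "saturday"), (1, "sunday")] := by decide

theorem A_eq_core (m : Int) (h : m ≠ 127) : weekday_str_py (some m) = coreA (PySem.Int.band m 127) := by
  have hf : weekdayBitsA.items.filter (fun p => PySem.Int.band m p.1 != 0)
      = weekdayBitsA.items.filter (fun p => PySem.Int.band (PySem.Int.band m 127) p.1 != 0) := by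
    rw [itemsA]
    simp only [List.filter, band64, band32, band16, band8, band4, band2, band1]
  have hb : (m == 127) = false := by simp [h]
  simp only [weekday_str_py, coreA, decode_weekdays_py, hb, Bool.false_eq_true, if_false, hf]

-- the per-residue agreement of A's else-branch with B's table, checked for all 128 patterns
set_option maxRecDepth 8192 in
theorem core_table : ∀ n : Nat, n < 128 →
    coreA (n : Int) = PySem.List.pyGetD buildTableB (n : Int) "" := by decide

-- ===== VERDICT (by name: the statement is the Claim_ definition above) =====
theorem weekday_str_py_spec : Claim_equal_weekday_str_py := by
  intro mask _
  unfold Spec_weekday_str_py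
  cases mask with
  | none => rfl
  | some m =>
    by_cases h : m = 127
    · simp [weekday_str_py, weekday_str_py_alt, decode_weekdays_py, h]
    · have hb : (m == 127) = false := by simp [h]
      have hbnd := band127_bounds m
      have hcast : PySem.Int.band m 127 = ((PySem.Int.band m 127).toNat : Int) := by omega
      rw [A_eq_core m h]
      show coreA (PySem.Int.band m 127) =
        (if m == 127 then "Every day" else PySem.List.pyGetD buildTableB (PySem.Int.band m 127) "")
      rw [hb]
      simp only [Bool.false_eq_true, if_false]
      rw [hcast]
      exact core_table _ (by omega)
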